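-- pv_equiv track=rewrite | github.com/daniel-reich/ubiquitous-fiesta | hQRuQguN4bKyM2gik_5.py | simple_check
-- ===== SOURCE A (Python) =====
-- def simple_check(a, b):
--   a,b = max(a,b),min(a,b)
--   total = 0
--   for i in range(b):
--     total+=(a%b==0)
--     a-=1
--     b-=1
--   return total
-- ===== SOURCE B (Python) =====
-- def simple_check(a, b):
--     lo = min(a, b)
--     d = abs(a - b)
--     if lo <= 0:
--         return 0
--     if d == 0:
--         return lo
--     total = 0
--     i = 1
--     while i * i <= d:
--         if d % i == 0:
--             if i <= lo:
--                 total += 1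
--             j = d // i
--             if j != i and j <= lo:
--                 total += 1
--         i += 1
--     return total
-- ===== Notes on version B (the rewrite author's own statement) =====
-- stated objective: faster
-- what changed: A decrements both numbers min(a,b) times and tests a%b==0 each step; B observes the test counts divisors of |a-b| that are at most min(a,b) and enumerates divisor pairs up to sqrt(|a-b|).
import Mathlib
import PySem

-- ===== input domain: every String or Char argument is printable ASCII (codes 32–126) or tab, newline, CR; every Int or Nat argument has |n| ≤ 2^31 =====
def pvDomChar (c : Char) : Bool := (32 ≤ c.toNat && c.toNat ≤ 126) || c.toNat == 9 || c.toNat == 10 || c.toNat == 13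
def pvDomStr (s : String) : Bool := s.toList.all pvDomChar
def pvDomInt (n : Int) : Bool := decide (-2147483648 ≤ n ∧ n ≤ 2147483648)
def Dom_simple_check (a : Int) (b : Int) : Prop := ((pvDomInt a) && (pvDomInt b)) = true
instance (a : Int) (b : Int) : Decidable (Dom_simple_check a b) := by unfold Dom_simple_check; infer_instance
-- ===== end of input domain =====

-- B counts divisors of |a-b| that are ≤ min(a,b) by enumerating divisor pairs i, d//i up to sqrt(|a-b|),
-- instead of A's loop decrementing both numbers min(a,b) times (objective: faster).

-- ===== PORT A =====
-- a,b = max(a,b),min(a,b); for i in range(b): total += (a%b==0); a -= 1; b -= 1  (state (a, b, total))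
def simple_check (a : Int) (b : Int) : Int :=
  ((PySem.List.pyRange 0 (min a b) 1).foldl
    (fun (st : Int × Int × Int) _ =>
      (st.1 - 1, st.2.1 - 1, st.2.2 + (if PySem.Int.mod st.1 st.2.1 = 0 then 1 else 0)))
    (max a b, min a b, 0)).2.2

-- ===== PORT B =====
-- while i*i <= d: if d % i == 0: count i if i <= lo, and the cofactor d//i if distinct and <= lo
def simple_check_altLoop (d : Int) (lo : Int) (i : Int) (total : Int) : Int :=
  if h : i * i ≤ d then
    simple_check_altLoop d lo (i + 1)
      (if PySem.Int.mod d i = 0 then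
        (if (PySem.Int.floordiv d i ≠ i ∧ PySem.Int.floordiv d i ≤ lo)
         then (if i ≤ lo then total + 1 else total) + 1
         else (if i ≤ lo then total + 1 else total))
       else total)
  else total
termination_by (d + 1 - i).toNat
decreasing_by
  have hi : i ≤ d := by nlinarith [sq_nonneg (i - 1)]
  omega

def simple_check_alt (a : Int) (b : Int) : Int :=
  if min a b ≤ 0 then 0
  else if |a - b| = 0 then min a b
  else simple_check_altLoop (|a - b|) (min a b) 1 0

-- ===== PRECONDITION & SPEC =====
def Spec_simple_check (a : Int) (b : Int) (out : Int) : Prop := out = simple_check_alt a b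
instance (a : Int) (b : Int) (out : Int) : Decidable (Spec_simple_check a b out) := by unfold Spec_simple_check; infer_instance

-- ===== CLAIM (what is proved, stated in full; the proofs are below) =====
def Claim_equal_simple_check : Prop := ∀ (a : Int) (b : Int), Dom_simple_check a b → Spec_simple_check a b (simple_check a b)

-- ===== LEMMAS AND PROOFS =====

-- A's loop body as a self-map of the state
def stepA : Int × Int × Int → Int × Int × Int :=
  fun st => (st.1 - 1, st.2.1 - 1, st.2.2 + (if PySem.Int.mod st.1 st.2.1 = 0 then 1 else 0))

-- the set of divisors of d in [1,lo] not yet counted by B's loop at index i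
noncomputable def pvRem (d lo i : Int) : Finset Int :=
  (Finset.Icc 1 lo).filter (fun j => j ∣ d ∧ i ≤ j ∧ i * j ≤ d)

lemma foldl_const_iterate {α β : Type} (l : List α) (f : β → β) (init : β) :
    l.foldl (fun s _ => f s) init = f^[l.length] init := by
  induction l generalizing init with
  | nil => rfl
  | cons x xs ih => simp [List.foldl, ih, Function.iterate_succ_apply]

lemma iterA (n : Nat) : ∀ (a b t : Int), (n : Int) ≤ b →
    (stepA^[n] (a, b, t)).2.2
      = t + ((Finset.Ioc (b - n) b).filter (fun j => j ∣ (a - b))).card := by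
  induction n with
  | zero => intro a b t _; simp
  | succ n ih =>
      intro a b t hb
      have hb' : (n : Int) + 1 ≤ b := by push_cast at hb; omega
      rw [Function.iterate_succ_apply]
      rw [show stepA (a, b, t)
          = (a - 1, b - 1, t + (if PySem.Int.mod a b = 0 then 1 else 0)) from rfl]
      rw [ih (a - 1) (b - 1) _ (by omega)]
      rw [show a - 1 - (b - 1) = a - b by ring]
      rw [show ((n + 1 : Nat) : Int) = (n : Int) + 1 by push_cast; ring]
      rw [show b - ((n : Int) + 1) = b - 1 - (n : Int) by ring]
      have hins : Finset.Ioc (b - 1 - (n : Int)) b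
          = insert b (Finset.Ioc (b - 1 - (n : Int)) (b - 1)) := by
        ext j; simp only [Finset.mem_Ioc, Finset.mem_insert]; omega
      have hbn : b ∉ (Finset.Ioc (b - 1 - (n : Int)) (b - 1)).filter
          (fun j => j ∣ (a - b)) := by
        simp [Finset.mem_Ioc]
      have hmod : (PySem.Int.mod a b = 0) ↔ b ∣ (a - b) := by
        rw [PySem.Int.mod_eq_zero_iff_dvd]
        constructor
        · intro h; exact dvd_sub h (dvd_refl b)
        · intro h; have := dvd_add h (dvd_refl b); simpa using this
      rw [hins, Finset.filter_insert]
      by_cases hdvd : b ∣ (a - b)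
      · rw [if_pos hdvd, Finset.card_insert_of_notMem hbn]
        simp only [hmod, hdvd, if_pos]
        push_cast; ring
      · rw [if_neg hdvd]
        simp only [hmod, hdvd, if_false]
        ring

-- A equals the count of divisors of max-min lying in [1, min]
lemma simple_check_eq_card (a b : Int) (hb : 1 ≤ min a b) :
    simple_check a b
      = ((Finset.Icc 1 (min a b)).filter (fun j => j ∣ (max a b - min a b))).card := by
  unfold simple_check
  rw [show (fun (st : Int × Int × Int) (_ : Int) =>
      (st.1 - 1, st.2.1 - 1, st.2.2 + (if PySem.Int.mod st.1 st.2.1 = 0 then 1 else 0)))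
    = (fun (st : Int × Int × Int) (_ : Int) => stepA st) from rfl]
  rw [foldl_const_iterate, PySem.List.length_pyRange_one]
  rw [iterA _ _ _ _ (by omega)]
  rw [show min a b - ((min a b - 0).toNat : Int) = 0 by omega]
  rw [show Finset.Ioc (0 : Int) (min a b) = Finset.Icc 1 (min a b) by
    ext j; simp only [Finset.mem_Ioc, Finset.mem_Icc]; omega]
  ring

lemma pvRem_empty (d lo i : Int) (hi : 1 ≤ i) (hgt : d < i * i) : pvRem d lo i = ∅ := by
  unfold pvRem
  ext j
  simp only [Finset.mem_filter, Finset.mem_Icc, Finset.notMem_empty, iff_false]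
  rintro ⟨⟨h1, _⟩, _, hij, hijd⟩
  nlinarith

-- one step of B's loop removes exactly the divisor pair {i, d/i} (when i ∣ d)
lemma pvRem_step (d lo i : Int) (hi : 1 ≤ i) (hd : 1 ≤ d) (hguard : i * i ≤ d) :
    ((pvRem d lo i).card : Int)
      = (pvRem d lo (i + 1)).card +
        (if i ∣ d then
          ((if i ≤ lo then (1 : Int) else 0) +
           (if d / i ≠ i ∧ d / i ≤ lo then (1 : Int) else 0))
         else 0) := by
  have hsub : pvRem d lo (i + 1) ⊆ pvRem d lo i := by
    intro j hj
    unfold pvRem at hj ⊢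
    simp only [Finset.mem_filter, Finset.mem_Icc] at hj ⊢
    obtain ⟨⟨h1, h2⟩, hdvd, hij, hijd⟩ := hj
    exact ⟨⟨h1, h2⟩, hdvd, by omega, by nlinarith⟩
  have hcard := Finset.card_sdiff_add_card_eq_card hsub
  have hE : pvRem d lo i \ pvRem d lo (i + 1)
      = if i ∣ d then ({i, d / i} : Finset Int).filter (fun j => j ≤ lo) else ∅ := by
    ext j
    simp only [Finset.mem_sdiff]
    unfold pvRem
    simp only [Finset.mem_filter, Finset.mem_Icc]
    constructor
    · rintro ⟨⟨⟨h1, h2⟩, hdvd, hij, hijd⟩, hnot⟩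
      by_cases hji : j = i
      · subst hji
        rw [if_pos hdvd]
        simp [h2]
      · obtain ⟨c, hc⟩ := hdvd
        have hjpos : 0 < j := by omega
        have hdlt : d < (i + 1) * j := by
          by_contra hle
          exact hnot ⟨⟨h1, h2⟩, ⟨c, hc⟩, by omega, by omega⟩
        have hci : c = i := by nlinarith
        have hidvd : i ∣ d := ⟨j, by rw [hc, hci]; ring⟩
        have hdivi : d / i = j := by
          rw [show d = i * j by rw [hc, hci]; ring]
          exact Int.mul_ediv_cancel_left j (by omega)
        rw [if_pos hidvd]
        simp [hdivi, h2]
    · intro hj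
      by_cases hdvd : i ∣ d
      · rw [if_pos hdvd] at hj
        simp only [Finset.mem_filter, Finset.mem_insert, Finset.mem_singleton] at hj
        obtain ⟨hj12, hjlo⟩ := hj
        obtain ⟨c, hc⟩ := hdvd
        have hdivi : d / i = c := by
          rw [hc]; exact Int.mul_ediv_cancel_left c (by omega)
        have hic : i ≤ c := by nlinarith
        rcases hj12 with hji | hjc
        · subst hji
          refine ⟨⟨⟨hi, hjlo⟩, ⟨c, hc⟩, le_refl _, hguard⟩, ?_⟩
          rintro ⟨⟨_, _⟩, _, hcon, _⟩; omega
        · rw [hdivi] at hjc; subst hjc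
          refine ⟨⟨⟨by omega, hjlo⟩, ⟨i, by rw [hc]; ring⟩, hic, by nlinarith⟩, ?_⟩
          rintro ⟨⟨_, _⟩, _, hic1, hicd⟩
          nlinarith
      · rw [if_neg hdvd] at hj
        exact absurd hj (by simp)
  rw [hE] at hcard
  by_cases hdvd : i ∣ d
  · rw [if_pos hdvd] at hcard
    rw [if_pos hdvd]
    obtain ⟨c, hc⟩ := hdvd
    have hdivi : d / i = c := by
      rw [hc]; exact Int.mul_ediv_cancel_left c (by omega)
    rw [hdivi] at hcard ⊢
    by_cases hci : c = i
    · subst hci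
      rw [show ({c, c} : Finset Int) = {c} by simp, Finset.filter_singleton] at hcard
      simp only [ne_eq, not_true_eq_false, false_and, if_false]
      by_cases hlo : c ≤ lo
      · rw [if_pos hlo] at hcard
        rw [if_pos hlo]
        simp only [Finset.card_singleton] at hcard
        omega
      · rw [if_neg hlo] at hcard
        rw [if_neg hlo]
        simp only [Finset.card_empty] at hcard
        omega
    · have hpair : (({i, c} : Finset Int).filter (fun j => j ≤ lo)).card
          = (if i ≤ lo then 1 else 0) + (if c ≤ lo then 1 else 0) := by
        rw [show ({i, c} : Finset Int) = insert i {c} from rfl,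
          Finset.filter_insert, Finset.filter_singleton]
        have hic : i ∉ ({c} : Finset Int) := by
          simp only [Finset.mem_singleton]
          exact fun h => hci h.symm
        by_cases h1 : i ≤ lo <;> by_cases h2 : c ≤ lo
        · rw [if_pos h1, if_pos h2, Finset.card_insert_of_notMem hic]
          simp [h1, h2]
        · rw [if_pos h1, if_neg h2, Finset.card_insert_of_notMem (by simp)]
          simp [h1, h2]
        · rw [if_neg h1, if_pos h2]
          simp [h1, h2]
        · rw [if_neg h1, if_neg h2]
          simp [h1, h2]
      rw [hpair] at hcard
      simp only [show (c ≠ i ∧ c ≤ lo) ↔ (c ≤ lo) from ⟨And.right, fun h => ⟨hci, h⟩⟩]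
      split_ifs at hcard ⊢ <;> omega
  · rw [if_neg hdvd] at hcard
    rw [if_neg hdvd]
    simp only [Finset.card_empty] at hcard
    omega

lemma altLoop_eq (d lo : Int) (hd : 1 ≤ d) :
    ∀ (n : Nat) (i t : Int), (d + 1 - i).toNat ≤ n → 1 ≤ i →
      simple_check_altLoop d lo i t = t + (pvRem d lo i).card := by
  intro n
  induction n with
  | zero =>
      intro i t hn hi
      have hii : i ≤ i * i := le_mul_of_one_le_left (by omega) hi
      have hguard : ¬ i * i ≤ d := by omega
      rw [simple_check_altLoop, dif_neg hguard, pvRem_empty d lo i hi (by omega)]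
      simp
  | succ n ih =>
      intro i t hn hi
      rw [simple_check_altLoop]
      by_cases hguard : i * i ≤ d
      · rw [dif_pos hguard]
        have hii : i ≤ i * i := le_mul_of_one_le_left (by omega) hi
        rw [ih (i + 1) _ (by omega) (by omega)]
        have hmod : (PySem.Int.mod d i = 0) ↔ i ∣ d := PySem.Int.mod_eq_zero_iff_dvd d i
        have hfd : PySem.Int.floordiv d i = d / i :=
          PySem.Int.floordiv_eq_ediv_of_pos (by omega)
        rw [pvRem_step d lo i hi hd hguard]
        simp only [hmod, hfd]
        by_cases hdvd : i ∣ d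
        · rw [if_pos hdvd, if_pos hdvd]
          split_ifs <;> push_cast <;> ring
        · rw [if_neg hdvd, if_neg hdvd]
          ring
      · rw [dif_neg hguard, pvRem_empty d lo i hi (by omega)]
        simp

lemma pvRem_one (d lo : Int) (hd : 1 ≤ d) :
    pvRem d lo 1 = (Finset.Icc 1 lo).filter (fun j => j ∣ d) := by
  unfold pvRem
  ext j
  simp only [Finset.mem_filter, Finset.mem_Icc, one_mul]
  constructor
  · rintro ⟨h1, h2, _, _⟩; exact ⟨h1, h2⟩
  · rintro ⟨⟨h1, h2⟩, hdvd⟩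
    exact ⟨⟨h1, h2⟩, hdvd, h1, Int.le_of_dvd (by omega) hdvd⟩

-- ===== VERDICT (by name: the statement is the Claim_ definition above) =====
theorem simple_check_spec : Claim_equal_simple_check := by
  intro a b _
  unfold Spec_simple_check simple_check_alt
  by_cases hlo : min a b ≤ 0
  · rw [if_pos hlo]
    unfold simple_check
    rw [PySem.List.pyRange_one_eq_nil (by omega)]
    rfl
  · rw [if_neg hlo]
    have hb1 : 1 ≤ min a b := by omega
    have habs : max a b - min a b = |a - b| := by
      rw [max_sub_min_eq_abs, abs_sub_comm]
    rw [simple_check_eq_card a b hb1, habs]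
    by_cases hd : |a - b| = 0
    · rw [if_pos hd, hd]
      rw [show (Finset.Icc 1 (min a b)).filter (fun j => j ∣ (0 : Int))
          = Finset.Icc 1 (min a b) by simp]
      rw [Int.card_Icc]
      omega
    · rw [if_neg hd]
      have hd1 : 1 ≤ |a - b| := by have := abs_nonneg (a - b); omega
      rw [altLoop_eq _ _ hd1 (|a - b| + 1 - 1).toNat 1 0 (le_refl _) (le_refl _),
        pvRem_one _ _ hd1]
      ring
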